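-- pv_equiv track=rewrite | github.com/anonymous-research-01/anonymous.4open.science | dqe/dqe_metric.py | convert_vector_to_events_dqe
-- ===== SOURCE A (Python) =====
-- def convert_vector_to_events_dqe(vector):
--     """
--     Convert a binary vector (indicating 1 for the anomalous instances)
--     to a list of events. The events are considered as durations,
--     i.e. setting 1 at index i corresponds to an anomalous interval [i, i+1).
--
--     :param vector: a list of elements belonging to {0, 1}
--     :return: a list of couples, each couple representing the start and stop of
--     each event
--     """
--     events = []
--     event_start = None
--     for i, val in enumerate(vector):
--         if val == 1:
--             if event_start is None:
--                 event_start = i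
--         else:
--             if event_start is not None:
--                 events.append((event_start, i))
--                 event_start = None
--     if event_start is not None:
--         events.append((event_start, len(vector)))
--     return events
-- ===== SOURCE B (Python) =====
-- def convert_vector_to_events_dqe(vector):
--     # Edge-detection decomposition: normalize to bits, pair each bit with its
--     # predecessor (virtual leading 0), collect rising-edge starts and
--     # falling-edge stops, close a trailing open run, then zip them up.
--     bits = [1 if v == 1 else 0 for v in vector]
--     pairs = list(zip([0] + bits, bits))
--     starts = [i for i, (p, c) in enumerate(pairs) if p == 0 and c == 1]
--     stops = [i for i, (p, c) in enumerate(pairs) if p == 1 and c == 0]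
--     if bits and bits[-1] == 1:
--         stops.append(len(bits))
--     return list(zip(starts, stops))
-- ===== Notes on version B (the rewrite author's own statement) =====
-- stated objective: alternative
-- what changed: Replaces A's single stateful scan (open-event accumulator) by edge detection: build separate rising-edge start and falling-edge stop index lists by comparing each bit to its predecessor, then zip them into couples.
import Mathlib
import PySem

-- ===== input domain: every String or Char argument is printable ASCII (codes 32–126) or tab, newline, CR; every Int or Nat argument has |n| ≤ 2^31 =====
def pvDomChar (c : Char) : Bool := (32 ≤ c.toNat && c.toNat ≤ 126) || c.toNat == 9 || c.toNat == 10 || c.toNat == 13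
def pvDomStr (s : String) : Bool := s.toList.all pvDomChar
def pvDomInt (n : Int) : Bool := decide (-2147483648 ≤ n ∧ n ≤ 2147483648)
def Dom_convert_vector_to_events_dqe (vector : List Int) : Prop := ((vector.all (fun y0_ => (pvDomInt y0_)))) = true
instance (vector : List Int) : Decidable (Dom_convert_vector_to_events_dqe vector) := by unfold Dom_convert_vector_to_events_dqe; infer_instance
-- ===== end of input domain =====

-- B replaces A's single stateful scan by edge detection (starts/stops lists zipped); alternative decomposition, same cost.

-- ===== PORT A =====
-- one step of A's for-loop body; state = (events so far, event_start)
def pvStepA (s : List (Int × Int) × Option Int) (p : Int × Int) : List (Int × Int) × Option Int :=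
  if p.2 == 1 then
    match s.2 with
    | none => (s.1, some p.1)
    | some _ => s
  else
    match s.2 with
    | some a => (s.1 ++ [(a, p.1)], none)
    | none => s

def convert_vector_to_events_dqe (vector : List Int) : List (Int × Int) :=
  let r := (PySem.List.enumerate vector 0).foldl pvStepA ([], none)
  match r.2 with
  | some a => r.1 ++ [(a, (vector.length : Int))]
  | none => r.1

-- ===== PORT B =====
-- bits normalization of Source B's comprehension
def pvNorm (v : Int) : Int := if v == 1 then 1 else 0

def convert_vector_to_events_dqe_alt (vector : List Int) : List (Int × Int) :=
  let bits := vector.map pvNorm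
  let pairs := (0 :: bits).zip bits
  let starts := ((PySem.List.enumerate pairs 0).filter (fun q => q.2.1 == 0 && q.2.2 == 1)).map (·.1)
  let stops0 := ((PySem.List.enumerate pairs 0).filter (fun q => q.2.1 == 1 && q.2.2 == 0)).map (·.1)
  let stops := if bits.getLast? == some 1 then stops0 ++ [(bits.length : Int)] else stops0
  starts.zip stops

-- ===== PRECONDITION & SPEC =====
def Spec_convert_vector_to_events_dqe (vector : List Int) (out : List (Int × Int)) : Prop := out = convert_vector_to_events_dqe_alt vector
instance (vector : List Int) (out : List (Int × Int)) : Decidable (Spec_convert_vector_to_events_dqe vector out) := by unfold Spec_convert_vector_to_events_dqe; infer_instance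

-- ===== CLAIM (what is proved, stated in full; the proofs are below) =====
def Claim_equal_convert_vector_to_events_dqe : Prop := ∀ (vector : List Int), Dom_convert_vector_to_events_dqe vector → Spec_convert_vector_to_events_dqe vector (convert_vector_to_events_dqe vector)

-- ===== LEMMAS AND PROOFS =====

-- canonical recursive description of the run decomposition
def pvRec (l : List Int) (i : Int) (es : Option Int) : List (Int × Int) :=
  match l with
  | [] => match es with
          | some a => [(a, i)]
          | none => []
  | v :: vs =>
      if v == 1 then
        pvRec vs (i + 1) (match es with | none => some i | some a => some a)
      else
        match es with
        | some a => (a, i) :: pvRec vs (i + 1) none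
        | none => pvRec vs (i + 1) none

-- starts list, edge-detection style, with previous bit carried
def pvS (p : Int) (l : List Int) (i : Int) : List Int :=
  match l with
  | [] => []
  | b :: bs => if p == 0 && b == 1 then i :: pvS b bs (i + 1) else pvS b bs (i + 1)

-- stops list without the trailing close
def pvT0 (p : Int) (l : List Int) (i : Int) : List Int :=
  match l with
  | [] => []
  | b :: bs => if p == 1 && b == 0 then i :: pvT0 b bs (i + 1) else pvT0 b bs (i + 1)

-- stops list with the trailing close included
def pvT (p : Int) (l : List Int) (i : Int) : List Int :=
  match l with
  | [] => if p == 1 then [i] else []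
  | b :: bs => if p == 1 && b == 0 then i :: pvT b bs (i + 1) else pvT b bs (i + 1)

lemma pvA_fold (vs : List Int) (i : Int) (acc : List (Int × Int)) (es : Option Int) :
    (match ((PySem.List.enumerate vs i).foldl pvStepA (acc, es)) with
     | (evs, some a) => evs ++ [(a, i + (vs.length : Int))]
     | (evs, none) => evs)
    = acc ++ pvRec vs i es := by
  induction vs generalizing i acc es with
  | nil =>
    cases es <;> simp [PySem.List.enumerate_nil, pvRec]
  | cons v vs ih =>
    rw [PySem.List.enumerate_cons]
    simp only [List.foldl_cons, List.length_cons]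
    rw [show ((vs.length + 1 : Nat) : Int) = (vs.length : Int) + 1 from by push_cast; ring]
    rw [show i + ((vs.length : Int) + 1) = (i + 1) + (vs.length : Int) from by ring]
    by_cases hv : v = 1
    · subst hv
      cases es with
      | none =>
        rw [show pvStepA (acc, none) (i, 1) = (acc, some i) from by simp [pvStepA]]
        rw [ih (i+1) acc (some i)]
        simp [pvRec]
      | some a =>
        rw [show pvStepA (acc, some a) (i, 1) = (acc, some a) from by simp [pvStepA]]
        rw [ih (i+1) acc (some a)]
        simp [pvRec]
    · cases es with
      | none =>
        rw [show pvStepA (acc, none) (i, v) = (acc, none) from by simp [pvStepA, hv]]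
        rw [ih (i+1) acc none]
        simp [pvRec, hv]
      | some a =>
        rw [show pvStepA (acc, some a) (i, v) = (acc ++ [(a, i)], none) from by simp [pvStepA, hv]]
        rw [ih (i+1) (acc ++ [(a, i)]) none]
        simp [pvRec, hv]

-- main correspondence: pvRec pairs starts with stops
lemma pvRec_zip (v : List Int) (i : Int) :
    (pvRec v i none = (pvS 0 (v.map pvNorm) i).zip (pvT 0 (v.map pvNorm) i))
    ∧ (∀ a : Int, pvRec v i (some a)
        = ((a :: pvS 1 (v.map pvNorm) i).zip (pvT 1 (v.map pvNorm) i))) := by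
  induction v generalizing i with
  | nil => simp [pvRec, pvS, pvT]
  | cons b bs ih =>
    by_cases hb : b = 1
    · refine ⟨?_, fun a => ?_⟩
      · simp only [pvRec, List.map_cons, pvNorm, pvS, pvT, hb]
        simpa using (ih (i + 1)).2 i
      · simp only [pvRec, List.map_cons, pvNorm, pvS, pvT, hb]
        simpa using (ih (i + 1)).2 a
    · refine ⟨?_, fun a => ?_⟩
      · simp only [pvRec, List.map_cons, pvNorm, pvS, pvT]
        simp only [if_neg (by simpa using hb), beq_self_eq_true, Bool.and_self]
        simpa [hb] using (ih (i + 1)).1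
      · simp only [pvRec, List.map_cons, pvNorm, pvS, pvT]
        simp only [if_neg (by simpa using hb), beq_self_eq_true, Bool.and_self]
        simp only [List.zip]
        simpa [hb, List.zip] using congrArg (List.cons (a, i)) (ih (i + 1)).1

-- B's filtered/enumerated starts list is pvS
lemma pvStarts_eq (l : List Int) (p : Int) (i : Int) :
    (((PySem.List.enumerate ((p :: l).zip l) i).filter
        (fun q => q.2.1 == 0 && q.2.2 == 1)).map (·.1)) = pvS p l i := by
  induction l generalizing p i with
  | nil => simp [PySem.List.enumerate_nil, pvS]
  | cons b bs ih =>
    simp only [List.zip_cons_cons, PySem.List.enumerate_cons, pvS]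
    by_cases h : p = 0 ∧ b = 1
    · simp [List.filter, h.1, h.2, ih]
    · have : ¬ (p == 0 && b == 1) = true := by
        simp only [Bool.and_eq_true, beq_iff_eq]; tauto
      simp only [List.filter_cons, this]
      simp [ih]

lemma pvStops_eq (l : List Int) (p : Int) (i : Int) :
    (((PySem.List.enumerate ((p :: l).zip l) i).filter
        (fun q => q.2.1 == 1 && q.2.2 == 0)).map (·.1)) = pvT0 p l i := by
  induction l generalizing p i with
  | nil => simp [PySem.List.enumerate_nil, pvT0]
  | cons b bs ih =>
    simp only [List.zip_cons_cons, PySem.List.enumerate_cons, pvT0]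
    by_cases h : p = 1 ∧ b = 0
    · simp [List.filter, h.1, h.2, ih]
    · have : ¬ (p == 1 && b == 0) = true := by
        simp only [Bool.and_eq_true, beq_iff_eq]; tauto
      simp only [List.filter_cons, this]
      simp [ih]

-- pvT = pvT0 plus the conditional trailing close
lemma pvT_eq (l : List Int) (p : Int) (i : Int) :
    pvT p l i = pvT0 p l i ++ (if l.getLastD p == 1 then [i + (l.length : Int)] else []) := by
  induction l generalizing p i with
  | nil => by_cases h : p = 1 <;> simp [pvT, pvT0, h]
  | cons b bs ih =>
    simp only [pvT, pvT0, List.getLastD_cons, List.length_cons]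
    rw [ih b (i + 1)]
    rw [show i + ((bs.length + 1 : Nat) : Int) = (i + 1) + (bs.length : Int) from by push_cast; ring]
    split_ifs <;> simp

-- pvT0 with the trailing conditional close, stated with getLast? as B computes it
lemma pvT_eq_getLast? (l : List Int) (i : Int) :
    pvT 0 l i = pvT0 0 l i ++ (if l.getLast? == some 1 then [i + (l.length : Int)] else []) := by
  rw [pvT_eq]
  have : (l.getLastD (0:Int) == 1) = (l.getLast? == some 1) := by
    rw [List.getLastD_eq_getLast?]
    cases l.getLast? <;> simp
  rw [this]

-- ===== VERDICT (by name: the statement is the Claim_ definition above) =====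
theorem convert_vector_to_events_dqe_spec : Claim_equal_convert_vector_to_events_dqe := by
  intro vector _
  unfold Spec_convert_vector_to_events_dqe
  have hA : convert_vector_to_events_dqe vector = pvRec vector 0 none := by
    unfold convert_vector_to_events_dqe
    have h := pvA_fold vector 0 [] none
    rcases hfold : (PySem.List.enumerate vector 0).foldl pvStepA ([], none) with ⟨evs, es⟩
    rw [hfold] at h
    cases es <;> simpa using h
  have hB : convert_vector_to_events_dqe_alt vector = pvRec vector 0 none := by
    unfold convert_vector_to_events_dqe_alt
    simp only [pvStarts_eq, pvStops_eq]
    rw [(pvRec_zip vector 0).1, pvT_eq_getLast?]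
    split_ifs with h <;> simp [h]
  rw [hA, hB]
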